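-- pv_equiv track=rewrite | github.com/bondarevts/yandex-paths | hamilton/__init__.py | _get_path_from_euler_cycles
-- ===== SOURCE A (Python) =====
-- def _get_path_from_euler_cycles(cycles):
--     vertex_set = set()
--     path = []
--     for cycle in cycles:
--         for vertex in cycle:
--             if vertex not in path:
--                 path.append(vertex)
--                 vertex_set.add(vertex)
--     return path
-- ===== SOURCE B (Python) =====
-- def _get_path_from_euler_cycles(cycles):
--     # Filter-ahead nub: flatten once, then repeatedly emit the first remaining
--     # vertex and delete all of its occurrences from the remaining stream.
--     flat = [vertex for cycle in cycles for vertex in cycle]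
--     path = []
--     while flat:
--         head = flat[0]
--         path.append(head)
--         flat = [v for v in flat if v != head]
--     return path
-- ===== Notes on version B (the rewrite author's own statement) =====
-- stated objective: alternative
-- what changed: Replaces the nested loop that tests each vertex for membership in the growing path by a filter-ahead nub: flatten all cycles into one list, then repeatedly emit the first remaining element and delete all its occurrences from the remainder, so no membership test against the output remains.
import Mathlib
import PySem

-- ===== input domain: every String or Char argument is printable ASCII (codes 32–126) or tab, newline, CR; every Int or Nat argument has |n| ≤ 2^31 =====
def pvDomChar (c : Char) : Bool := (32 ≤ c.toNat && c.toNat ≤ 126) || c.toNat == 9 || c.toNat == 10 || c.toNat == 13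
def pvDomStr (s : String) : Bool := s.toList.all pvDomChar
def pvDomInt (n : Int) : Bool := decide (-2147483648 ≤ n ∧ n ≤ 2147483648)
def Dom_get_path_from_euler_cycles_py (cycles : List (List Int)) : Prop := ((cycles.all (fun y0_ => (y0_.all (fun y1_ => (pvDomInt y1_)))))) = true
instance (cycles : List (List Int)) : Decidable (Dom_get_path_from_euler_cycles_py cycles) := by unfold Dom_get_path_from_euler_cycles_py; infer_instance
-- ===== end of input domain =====

-- B replaces A's membership test against the growing path by a filter-ahead nub over the flattened cycles (objective: alternative).

-- ===== PORT A =====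
-- nested loop over cycles/vertices maintaining (vertex_set, path); appends vertex when not already in path
def get_path_from_euler_cycles_py (cycles : List (List Int)) : List Int :=
  (cycles.foldl (fun st cycle =>
      cycle.foldl (fun st v =>
          if v ∈ st.2 then st else (PySem.Set.add st.1 v, st.2 ++ [v])) st)
    ((PySem.Set.empty : PySem.Set Int), ([] : List Int))).2

-- ===== PORT B =====
-- while flat: emit flat[0], filter all its occurrences out of flat
def pvNubLoop (flat path : List Int) : List Int :=
  match flat with
  | [] => path
  | head :: t => pvNubLoop ((head :: t).filter (fun v => v != head)) (path ++ [head])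
termination_by flat.length
decreasing_by
  simp only [List.filter_cons, bne_self_eq_false, List.length_cons]
  exact Nat.lt_succ_of_le (List.length_filter_le _ _)

def get_path_from_euler_cycles_py_alt (cycles : List (List Int)) : List Int :=
  pvNubLoop (cycles.flatMap (fun cycle => cycle)) []

-- ===== PRECONDITION & SPEC =====
def Spec_get_path_from_euler_cycles_py (cycles : List (List Int)) (out : List Int) : Prop := out = get_path_from_euler_cycles_py_alt cycles
instance (cycles : List (List Int)) (out : List Int) : Decidable (Spec_get_path_from_euler_cycles_py cycles out) := by unfold Spec_get_path_from_euler_cycles_py; infer_instance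

-- ===== CLAIM (what is proved, stated in full; the proofs are below) =====
def Claim_equal_get_path_from_euler_cycles_py : Prop := ∀ (cycles : List (List Int)), Dom_get_path_from_euler_cycles_py cycles → Spec_get_path_from_euler_cycles_py cycles (get_path_from_euler_cycles_py cycles)

-- ===== LEMMAS AND PROOFS =====

-- the snd component of A's pair-state inner loop ignores the set component
theorem pv_inner (cycle : List Int) (st : PySem.Set Int × List Int) :
    (cycle.foldl (fun st v =>
        if v ∈ st.2 then st else (PySem.Set.add st.1 v, st.2 ++ [v])) st).2
      = cycle.foldl (fun p v => if v ∈ p then p else p ++ [v]) st.2 := by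
  induction cycle generalizing st with
  | nil => rfl
  | cons x xs ih =>
      simp only [List.foldl_cons]
      rw [ih]
      by_cases h : x ∈ st.2 <;> simp [h]

theorem pv_outer (cycles : List (List Int)) (st : PySem.Set Int × List Int) :
    (cycles.foldl (fun st cycle =>
        cycle.foldl (fun st v =>
            if v ∈ st.2 then st else (PySem.Set.add st.1 v, st.2 ++ [v])) st) st).2
      = (cycles.flatMap (fun c => c)).foldl
          (fun p v => if v ∈ p then p else p ++ [v]) st.2 := by
  induction cycles generalizing st with
  | nil => rfl
  | cons c cs ih =>
      simp only [List.foldl_cons, List.flatMap_cons, List.foldl_append]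
      rw [ih, pv_inner]

-- once x is in the accumulator, occurrences of x in the stream are no-ops for A's fold
theorem pv_skip (xs : List Int) (p : List Int) (x : Int) (hx : x ∈ p) :
    xs.foldl (fun p v => if v ∈ p then p else p ++ [v]) p
      = (xs.filter (fun v => v != x)).foldl (fun p v => if v ∈ p then p else p ++ [v]) p := by
  induction xs generalizing p with
  | nil => rfl
  | cons y ys ih =>
      by_cases hyx : y = x
      · subst hyx
        simp only [List.filter_cons, bne_self_eq_false, List.foldl_cons, if_pos hx]
        exact ih p hx
      · have hb : (y != x) = true := by simpa using hyx
        simp only [List.filter_cons, hb, if_true, List.foldl_cons]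
        by_cases hy : y ∈ p
        · simp only [if_pos hy]; exact ih p hx
        · simp only [if_neg hy]
          exact ih (p ++ [y]) (List.mem_append_left _ hx)

-- main invariant: if the stream is disjoint from the accumulator, A's fold equals B's nub loop
theorem pv_main : ∀ (n : ℕ) (flat : List Int), flat.length ≤ n → ∀ (path : List Int),
    (∀ v ∈ flat, v ∉ path) →
    flat.foldl (fun p v => if v ∈ p then p else p ++ [v]) path = pvNubLoop flat path := by
  intro n
  induction n with
  | zero =>
      intro flat hlen path _
      have : flat = [] := List.eq_nil_of_length_eq_zero (Nat.le_zero.mp hlen)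
      subst this; rw [pvNubLoop]; rfl
  | succ n ih =>
      intro flat hlen path hdisj
      match flat with
      | [] => rw [pvNubLoop]; rfl
      | x :: xs =>
          have hxp : x ∉ path := hdisj x (List.mem_cons_self ..)
          rw [pvNubLoop]
          simp only [List.foldl_cons, if_neg hxp, List.filter_cons, bne_self_eq_false,
            Bool.false_eq_true, if_false]
          have hx' : x ∈ path ++ [x] := List.mem_append_right _ (List.mem_singleton.mpr rfl)
          rw [pv_skip xs (path ++ [x]) x hx']
          apply ih
          · exact Nat.le_trans (List.length_filter_le _ _) (Nat.le_of_succ_le_succ hlen)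
          · intro v hv
            have hvx : v ≠ x := by
              have := List.of_mem_filter hv
              simpa using this
            have hvxs : v ∈ xs := List.mem_of_mem_filter hv
            have hvp : v ∉ path := hdisj v (List.mem_cons_of_mem _ hvxs)
            simp [hvp, hvx]

-- ===== VERDICT (by name: the statement is the Claim_ definition above) =====
theorem get_path_from_euler_cycles_py_spec : Claim_equal_get_path_from_euler_cycles_py := by
  intro cycles _
  unfold Spec_get_path_from_euler_cycles_py get_path_from_euler_cycles_py
    get_path_from_euler_cycles_py_alt
  rw [pv_outer]
  exact pv_main (cycles.flatMap (fun c => c)).length _ le_rfl [] (by simp)
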